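-- pv_equiv track=rewrite | github.com/ServiceNow/insight-bench | ada_insightarena/gradio_QuesAnsPlot.py | boldify_headings
-- ===== SOURCE A (Python) =====
-- def boldify_headings(text):
--     lines = text.split("\n")
--     new_lines = []
--     for line in lines:
--         if line.startswith("### "):
--             heading = line[4:].strip()
--             new_lines.append(f"<span style='font-weight:bold; color:black;'>{heading}</span>")
--         else:
--             new_lines.append(line)
--     return "\n".join(new_lines)
-- ===== SOURCE B (Python) =====
-- def _bold_line(line):
--     if line.startswith("### "):
--         return "<span style='font-weight:bold; color:black;'>" + line[4:].strip() + "</span>"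
--     return line
--
--
-- def boldify_headings(text):
--     # recurse on the first newline instead of split/loop/join
--     i = text.find("\n")
--     if i < 0:
--         return _bold_line(text)
--     return _bold_line(text[:i]) + "\n" + boldify_headings(text[i + 1:])
-- ===== Notes on version B (the rewrite author's own statement) =====
-- stated objective: alternative
-- what changed: Replaces split-into-a-list + explicit loop with an accumulator + join by a direct recursion on the first newline located with text.find, transforming each line with a helper.
import Mathlib
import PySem

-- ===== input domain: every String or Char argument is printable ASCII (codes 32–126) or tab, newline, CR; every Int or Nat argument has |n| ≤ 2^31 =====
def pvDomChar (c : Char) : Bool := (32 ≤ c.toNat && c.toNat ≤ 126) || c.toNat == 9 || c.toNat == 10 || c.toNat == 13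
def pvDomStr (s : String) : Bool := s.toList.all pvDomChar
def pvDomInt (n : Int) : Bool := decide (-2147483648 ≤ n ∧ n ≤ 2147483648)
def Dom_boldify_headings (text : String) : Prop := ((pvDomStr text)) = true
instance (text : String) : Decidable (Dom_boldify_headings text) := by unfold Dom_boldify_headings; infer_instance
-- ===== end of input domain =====

-- B replaces split/loop/join with a recursion on the first newline; objective: alternative decomposition, same cost.

def pvSpanOpen : List Char := "<span style='font-weight:bold; color:black;'>".toList
def pvSpanClose : List Char := "</span>".toList

-- ===== PORT A =====
-- split on "\n", loop appending transformed lines, join with "\n"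
def boldify_headings (text : String) : String :=
  let lines := PySem.Chars.splitOn text.toList ['\n']
  let new_lines : List (List Char) :=
    lines.foldl (fun acc line =>
      if PySem.Chars.startswith line ("### ".toList) then
        let heading := PySem.Chars.strip (PySem.Chars.slice line (some 4) none)
        acc ++ [pvSpanOpen ++ heading ++ pvSpanClose]
      else acc ++ [line]) []
  String.ofList (PySem.Chars.join ['\n'] new_lines)

-- ===== PORT B =====
-- _bold_line from Source B
def pvBoldLine (line : List Char) : List Char :=
  if PySem.Chars.startswith line ("### ".toList) then
    pvSpanOpen ++ PySem.Chars.strip (PySem.Chars.slice line (some 4) none) ++ pvSpanClose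
  else line

-- recursion on the first '\n' (text.find), as in Source B
def pvBoldAux (cs : List Char) : List Char :=
  let i := PySem.Chars.find cs ['\n']
  if _h : i < 0 then pvBoldLine cs
  else
    pvBoldLine (PySem.Chars.slice cs none (some i)) ++
      '\n' :: pvBoldAux (PySem.Chars.slice cs (some (i + 1)) none)
termination_by cs.length
decreasing_by
  have hnn : 0 ≤ PySem.Chars.find cs ['\n'] := le_of_not_gt _h
  have hne : PySem.Chars.find cs ['\n'] ≠ -1 := by omega
  have hinf := (PySem.Chars.find_ne_neg_one_iff cs ['\n']).mp hne
  have hne2 : cs ≠ [] := by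
    intro hc; subst hc
    simp [List.infix_nil] at hinf
  have hlen : 0 < cs.length := List.length_pos_iff.mpr hne2
  rw [PySem.Chars.slice_eq_listSlice, PySem.List.slice_from cs (by omega)]
  have : 1 ≤ (PySem.Chars.find cs ['\n'] + 1).toNat := by omega
  simp only [List.length_drop]
  omega

def boldify_headings_alt (text : String) : String :=
  String.ofList (pvBoldAux text.toList)

-- ===== PRECONDITION & SPEC =====
def Spec_boldify_headings (text : String) (out : String) : Prop := out = boldify_headings_alt text
instance (text : String) (out : String) : Decidable (Spec_boldify_headings text out) := by unfold Spec_boldify_headings; infer_instance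

-- ===== CLAIM (what is proved, stated in full; the proofs are below) =====
def Claim_equal_boldify_headings : Prop := ∀ (text : String), Dom_boldify_headings text → Spec_boldify_headings text (boldify_headings text)

-- ===== LEMMAS AND PROOFS =====

lemma pv_modifyHead_self {α : Type} (l : List α) : List.modifyHead (fun x => x) l = l := by
  cases l <;> rfl

-- A's loop is a map over the lines
lemma pv_foldl_map (l : List (List Char)) (acc : List (List Char)) :
    l.foldl (fun acc line =>
      if PySem.Chars.startswith line ("### ".toList) then
        let heading := PySem.Chars.strip (PySem.Chars.slice line (some 4) none)
        acc ++ [pvSpanOpen ++ heading ++ pvSpanClose]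
      else acc ++ [line]) acc = acc ++ l.map pvBoldLine := by
  induction l generalizing acc with
  | nil => simp
  | cons x xs ih =>
    simp only [List.foldl_cons, List.map_cons, ih, pvBoldLine]
    split <;> simp

-- PySem's fueled splitOn.go on a one-char separator, characterised via List.splitOn
lemma pv_splitOn_go (c : Char) (fuel : Nat) :
    ∀ (l cur : List Char) (acc : List (List Char)), l.length < fuel →
    PySem.Chars.splitOn.go [c] fuel l cur acc
      = acc.reverse ++ (l.splitOn c).modifyHead (cur.reverse ++ ·) := by
  induction fuel with
  | zero => intro l cur acc h; omega
  | succ n ih =>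
    intro l cur acc h
    cases l with
    | nil =>
      rw [PySem.Chars.splitOn.go]
      simp [List.splitOn_nil]
      omega
    | cons x rest =>
      rw [PySem.Chars.splitOn.go]
      by_cases hx : c = x
      · subst hx
        have hp : [c].isPrefixOf (c :: rest) = true := by simp [List.isPrefixOf]
        simp only [hp, if_true, List.length_cons, List.length_nil, List.drop_succ_cons,
          List.drop_zero]
        rw [ih rest [] _ (by simp at h; omega)]
        have hs : (c :: rest).splitOn c = [] :: rest.splitOn c := by
          simp [List.splitOn, List.splitOnP_cons]
        rw [hs]
        simp [pv_modifyHead_self]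
      · have hp : [c].isPrefixOf (x :: rest) = false := by
          simp [List.isPrefixOf, hx]
        simp only [hp, Bool.false_eq_true, if_false]
        rw [ih rest (x :: cur) acc (by simp at h; omega)]
        have hs : (x :: rest).splitOn c = (rest.splitOn c).modifyHead (List.cons x) := by
          simp [List.splitOn, List.splitOnP_cons, Ne.symm hx]
        rw [hs, List.modifyHead_modifyHead]
        have hf : ((fun y => cur.reverse ++ y) ∘ List.cons x)
            = (fun y => (x :: cur).reverse ++ y) := by
          funext y; simp
        rw [hf]

-- the top-level bridge: PySem's splitOn on ['\n'] is List.splitOn '\n'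
lemma pv_splitOn_eq (cs : List Char) :
    PySem.Chars.splitOn cs ['\n'] = cs.splitOn '\n' := by
  rw [PySem.Chars.splitOn, pv_splitOn_go _ _ _ _ _ (by omega)]
  simp [pv_modifyHead_self]

-- first '\n' found at i ≥ 0 decomposes cs as (no-'\n' prefix) ++ '\n' :: rest
lemma pv_find_decomp (cs : List Char) (h : ¬ PySem.Chars.find cs ['\n'] < 0) :
    let n := (PySem.Chars.find cs ['\n']).toNat
    cs = cs.take n ++ '\n' :: cs.drop (n + 1) ∧ '\n' ∉ cs.take n := by
  intro n
  have hne : PySem.Chars.find cs ['\n'] ≠ -1 := by omega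
  have hspec := PySem.Chars.findFrom_natCast_spec cs ['\n'] 0 (by omega)
    (by simp only [Nat.cast_zero, PySem.Chars.findFrom_zero]; exact hne)
  simp only [Nat.cast_zero, PySem.Chars.findFrom_zero] at hspec
  obtain ⟨-, hpre, hmin⟩ := hspec
  obtain ⟨t, ht⟩ := hpre
  simp only [List.singleton_append] at ht
  have hdrop1 : cs.drop (n + 1) = t := by
    have h2 : cs.drop (n + 1) = (cs.drop n).drop 1 := by
      rw [List.drop_drop]
    rw [h2, ← ht]
    rfl
  constructor
  · conv_lhs => rw [← List.take_append_drop n cs]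
    rw [hdrop1, ← ht]
  · intro hmem
    obtain ⟨j, hj, hget⟩ := List.mem_iff_getElem.mp hmem
    have hjn : j < n ∧ j < cs.length := by
      simpa [List.length_take, Nat.lt_min] using hj
    have hgc : cs[j]'hjn.2 = '\n' := by rw [← hget, List.getElem_take]
    refine hmin j (by omega) hjn.1 ?_
    rw [List.drop_eq_getElem_cons hjn.2, hgc]
    exact ⟨List.drop (j + 1) cs, by simp⟩

-- B's recursion computes intercalate-of-map over List.splitOn
lemma pvBoldAux_eq (cs : List Char) :
    pvBoldAux cs = ['\n'].intercalate ((cs.splitOn '\n').map pvBoldLine) := by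
  rw [pvBoldAux]
  by_cases h : PySem.Chars.find cs ['\n'] < 0
  · simp only [h, dif_pos]
    have hne : PySem.Chars.find cs ['\n'] = -1 := by
      have := PySem.Chars.neg_one_le_find cs ['\n']
      omega
    have hni := (PySem.Chars.find_eq_neg_one_iff cs ['\n']).mp hne
    have hnm : '\n' ∉ cs := by
      intro hm
      obtain ⟨u, v, huv⟩ := List.append_of_mem hm
      exact hni ⟨u, v, by rw [huv]; simp⟩
    have hsplit : cs.splitOn '\n' = [cs] :=
      List.splitOnP_eq_single _ _ (by
        intro x hx
        simp only [beq_iff_eq]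
        intro hxe; exact hnm (hxe ▸ hx))
    rw [hsplit]
    simp [List.intercalate]
  · simp only [h, dif_neg, not_false_iff]
    obtain ⟨hdec, hnm⟩ := pv_find_decomp cs h
    set i := PySem.Chars.find cs ['\n'] with hi
    have h0 : 0 ≤ i := by omega
    have hsplit : cs.splitOn '\n' = cs.take i.toNat :: (cs.drop (i.toNat + 1)).splitOn '\n' := by
      conv_lhs => rw [hdec]
      exact List.splitOnP_first _ _ (by
        intro x hx
        simp only [beq_iff_eq]
        intro hxe; exact hnm (hxe ▸ hx)) _ (by simp) _
    have hto : PySem.Chars.slice cs none (some i) = cs.take i.toNat := by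
      rw [PySem.Chars.slice_eq_listSlice, PySem.List.slice_to cs h0]
    have hfrom : PySem.Chars.slice cs (some (i + 1)) none = cs.drop (i.toNat + 1) := by
      rw [PySem.Chars.slice_eq_listSlice, PySem.List.slice_from cs (by omega)]
      congr 1
      omega
    rw [hto, hfrom, hsplit, pvBoldAux_eq (cs.drop (i.toNat + 1))]
    have hnn : (cs.drop (i.toNat + 1)).splitOn '\n' ≠ [] := List.splitOnP_ne_nil _ _
    cases hsp : (cs.drop (i.toNat + 1)).splitOn '\n' with
    | nil => exact absurd hsp hnn
    | cons a l => simp [List.intercalate]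
termination_by cs.length
decreasing_by
  have hne : PySem.Chars.find cs ['\n'] ≠ -1 := by omega
  have hinf := (PySem.Chars.find_ne_neg_one_iff cs ['\n']).mp hne
  have hne2 : cs ≠ [] := by
    intro hc; subst hc; simp [List.infix_nil] at hinf
  have hlen : 0 < cs.length := List.length_pos_iff.mpr hne2
  simp only [List.length_drop]
  omega

-- ===== VERDICT (by name: the statement is the Claim_ definition above) =====
theorem boldify_headings_spec : Claim_equal_boldify_headings := by
  intro text _
  unfold Spec_boldify_headings
  simp only [boldify_headings, boldify_headings_alt]
  congr 1
  rw [pv_foldl_map, List.nil_append, pv_splitOn_eq, pvBoldAux_eq]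
  rfl
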